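-- pv_equiv track=rewrite | github.com/Constellab/gws_plate_reader | src/gws_plate_reader/multiple_experiments_dashboard/_parser_multiple_experiments_dashboard_code/main.py | get_complete_wells_data
-- ===== SOURCE A (Python) =====
-- WELLS_NUMBER = 48  # 96
--
-- COLS = 8  # 12
--
-- def get_complete_wells_data(wells_data_list: dict) -> dict:
--     """
--     Get the complete wells data with the missing wells
--     :param well_data_list: the list of wells data
--     :return: the complete wells data
--     """
--     complete_wells_data_list = {}
--     for well in range(WELLS_NUMBER):
--         well_letter = chr(65 + well // COLS)
--         # 2 digit number
--         well_number = well % COLS + 1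
--         if well_number < 10:
--             well_number = f'0{well_number}'
--         well_name = f'{well_letter}{well_number}'
--         complete_wells_data_list[well_name] = {}
--         for plate, wells_data in wells_data_list.items():
--             if well_name in wells_data:
--                 complete_wells_data_list[well_name][plate] = wells_data[well_name]
--     return complete_wells_data_list
-- ===== SOURCE B (Python) =====
-- WELLS_NUMBER = 48  # 96
--
-- COLS = 8  # 12
--
-- def get_complete_wells_data(wells_data_list: dict) -> dict:
--     """
--     Get the complete wells data with the missing wells
--     :param well_data_list: the list of wells data
--     :return: the complete wells data
--     """
--     # well numbers are 1..COLS (< 10), so :02d is the same two-digit padding A builds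
--     names = [f"{chr(65 + i // COLS)}{i % COLS + 1:02d}" for i in range(WELLS_NUMBER)]
--     valid = set(names)
--     result = {name: {} for name in names}
--     for plate, wells_data in wells_data_list.items():
--         for well_name, value in wells_data.items():
--             if well_name in valid:
--                 result[well_name][plate] = value
--     return result
-- ===== Notes on version B (the rewrite author's own statement) =====
-- stated objective: alternative
-- what changed: Inverts the loop nesting: B precomputes the 48 valid well names once, initialises every name to {}, then makes a single pass over each plate's actual items, filtering by membership in the name set, instead of A's scan of every plate for each of the 48 names.
import Mathlib
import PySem

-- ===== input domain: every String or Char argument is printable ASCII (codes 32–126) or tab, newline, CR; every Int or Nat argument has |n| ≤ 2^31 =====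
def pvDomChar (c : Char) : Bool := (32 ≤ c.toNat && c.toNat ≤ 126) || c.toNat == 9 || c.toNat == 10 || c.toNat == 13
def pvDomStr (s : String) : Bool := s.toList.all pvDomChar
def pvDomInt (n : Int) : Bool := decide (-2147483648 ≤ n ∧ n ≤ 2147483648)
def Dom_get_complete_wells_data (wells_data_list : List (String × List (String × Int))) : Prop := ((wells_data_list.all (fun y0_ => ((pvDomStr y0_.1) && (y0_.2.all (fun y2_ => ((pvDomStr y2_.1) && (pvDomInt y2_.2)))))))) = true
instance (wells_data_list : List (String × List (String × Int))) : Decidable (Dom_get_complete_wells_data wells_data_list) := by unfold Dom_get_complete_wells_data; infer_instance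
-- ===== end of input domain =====

-- B inverts A's loop nesting: it precomputes the 48 valid well names once and then makes a single
-- pass over each plate's actual items (filtered by the valid-name set) instead of scanning every
-- plate once for each of the 48 names. Equivalence of the return value is proved on valid dict
-- representations (no duplicate keys).

-- ===== PORT A =====
def get_complete_wells_data (wells_data_list : List (String × List (String × Int))) : List (String × List (String × Int)) :=
  let complete_wells_data_list : PySem.Dict String (PySem.Dict String Int) :=
    (PySem.List.pyRange 0 48 1).foldl
      (fun acc well =>
        let well_letter : Char := Char.ofNat (65 + PySem.Int.floordiv well 8).toNat
        let well_number : Int := PySem.Int.mod well 8 + 1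
        -- f'0{well_number}' / f'{well_number}' built on List Char (kernel-transparent)
        let well_number_str : List Char :=
          if well_number < 10 then '0' :: PySem.Int.toChars well_number else PySem.Int.toChars well_number
        let well_name : String := String.ofList (well_letter :: well_number_str)
        let acc := acc.insert well_name PySem.Dict.empty
        wells_data_list.foldl
          (fun acc pw =>
            let wells_data := PySem.Dict.mk pw.2
            if wells_data.contains well_name then
              acc.modify well_name PySem.Dict.empty
                (fun d => d.insert pw.1 ((wells_data.get? well_name).getD 0))
            else acc)
          acc)
      PySem.Dict.empty
  complete_wells_data_list.items.map (fun p => (p.1, p.2.items))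

-- ===== PORT B =====
-- the 48 valid well names; well numbers are 1..8 (< 10), so f'{n:02d}' is '0' followed by the digit
def pvWellNames : List String :=
  (PySem.List.pyRange 0 48 1).map
    (fun i => String.ofList (Char.ofNat (65 + PySem.Int.floordiv i 8).toNat
                          :: '0' :: PySem.Int.toChars (PySem.Int.mod i 8 + 1)))

def get_complete_wells_data_alt (wells_data_list : List (String × List (String × Int))) : List (String × List (String × Int)) :=
  let valid : PySem.Set String := PySem.Set.ofList pvWellNames
  let result0 : PySem.Dict String (PySem.Dict String Int) :=
    pvWellNames.foldl (fun r nm => r.insert nm PySem.Dict.empty) PySem.Dict.empty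
  let result : PySem.Dict String (PySem.Dict String Int) :=
    wells_data_list.foldl
      (fun r pw =>
        pw.2.foldl
          (fun r wv =>
            if PySem.Set.contains valid wv.1 then
              r.modify wv.1 PySem.Dict.empty (fun d => d.insert pw.1 wv.2)
            else r)
          r)
      result0
  result.items.map (fun p => (p.1, p.2.items))

-- ===== PRECONDITION & SPEC =====
-- Pre_ excludes association lists with a duplicate plate key or a duplicate well key inside a
-- plate: those do not represent Python dict arguments (a Python dict has unique keys), so A's
-- behaviour on them is not defined by the source.
def Pre_get_complete_wells_data (wells_data_list : List (String × List (String × Int))) : Prop :=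
  (wells_data_list.map Prod.fst).Nodup ∧ ∀ pw ∈ wells_data_list, (pw.2.map Prod.fst).Nodup
instance (wells_data_list : List (String × List (String × Int))) : Decidable (Pre_get_complete_wells_data wells_data_list) := by unfold Pre_get_complete_wells_data; infer_instance
def pvWitness_get_complete_wells_data : (List (String × List (String × Int))) :=
  [("P1", [("A01", 5), ("X00", 7)]), ("P2", [("A01", 1)])]

def Spec_get_complete_wells_data (wells_data_list : List (String × List (String × Int))) (out : List (String × List (String × Int))) : Prop := out = get_complete_wells_data_alt wells_data_list
instance (wells_data_list : List (String × List (String × Int))) (out : List (String × List (String × Int))) : Decidable (Spec_get_complete_wells_data wells_data_list out) := by unfold Spec_get_complete_wells_data; infer_instance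

-- ===== CLAIM (what is proved, stated in full; the proofs are below) =====
def Claim_equal_get_complete_wells_data : Prop := ∀ (wells_data_list : List (String × List (String × Int))), Dom_get_complete_wells_data wells_data_list → Pre_get_complete_wells_data wells_data_list → Spec_get_complete_wells_data wells_data_list (get_complete_wells_data wells_data_list)

-- ===== LEMMAS AND PROOFS =====

-- A's per-plate step for a fixed well name nm: membership test + first-match lookup
def pvRowStep (nm : String) (d : PySem.Dict String Int) (pw : String × List (String × Int)) : PySem.Dict String Int :=
  if (PySem.Dict.mk pw.2).contains nm then
    d.insert pw.1 (((PySem.Dict.mk pw.2).get? nm).getD 0)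
  else d

-- the inner dict A builds for well name nm
def pvRow (wdl : List (String × List (String × Int))) (nm : String) : PySem.Dict String Int :=
  wdl.foldl (pvRowStep nm) PySem.Dict.empty

-- inserting back the value already stored at a present key is the identity
lemma insert_getD_self_of_contains {ν : Type} (d : PySem.Dict String ν) (nm : String) (dflt : ν)
    (hnd : d.keys.Nodup) (hc : d.contains nm = true) :
    d.insert nm (d.getD nm dflt) = d := by
  apply PySem.Dict.ext
  rw [PySem.Dict.items_insert_of_contains _ _ hc]
  conv_rhs => rw [← List.map_id d.items]
  apply List.map_congr_left
  intro p hp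
  obtain ⟨k, v⟩ := p
  by_cases h : k = nm
  · subst h
    simp [PySem.Dict.getD_of_mem_items _ hp hnd]
  · simp [h]

-- a fold that only modifies the fixed, present key nm is one insert at nm
lemma foldl_modify_fixed {α ν : Type} (L : List α) (c : α → Bool) (g : α → ν → ν)
    (nm : String) (dflt : ν) (d : PySem.Dict String ν)
    (hnd : d.keys.Nodup) (hc : d.contains nm = true) :
    L.foldl (fun a x => if c x then a.modify nm dflt (g x) else a) d
      = d.insert nm (L.foldl (fun v x => if c x then g x v else v) (d.getD nm dflt)) := by
  induction L generalizing d with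
  | nil =>
    simpa using (insert_getD_self_of_contains d nm dflt hnd hc).symm
  | cons x L ih =>
    simp only [List.foldl_cons]
    by_cases hcx : c x
    · simp only [hcx, if_true]
      have hm : d.modify nm dflt (g x) = d.insert nm (g x (d.getD nm dflt)) := rfl
      rw [hm, ih _ (PySem.Dict.nodup_keys_insert _ _ _ hnd) (PySem.Dict.contains_insert_self _ _ _),
          PySem.Dict.getD_insert_self, PySem.Dict.insert_insert_self]
    · simp only [hcx]
      exact ih d hnd hc

-- A's outer loop: per name, "insert {} then modify repeatedly" collapses to one insert of the row
lemma a_outer_eq (wdl : List (String × List (String × Int))) (names : List String)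
    (acc : PySem.Dict String (PySem.Dict String Int)) (hnd : acc.keys.Nodup) :
    names.foldl (fun acc nm =>
        wdl.foldl (fun a pw =>
            if (PySem.Dict.mk pw.2).contains nm then
              a.modify nm PySem.Dict.empty (fun d => d.insert pw.1 (((PySem.Dict.mk pw.2).get? nm).getD 0))
            else a)
          (acc.insert nm PySem.Dict.empty))
      acc
      = names.foldl (fun acc nm => acc.insert nm (pvRow wdl nm)) acc := by
  induction names generalizing acc with
  | nil => rfl
  | cons nm names ih =>
    simp only [List.foldl_cons]
    rw [foldl_modify_fixed wdl (fun pw => (PySem.Dict.mk pw.2).contains nm)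
          (fun pw d => d.insert pw.1 (((PySem.Dict.mk pw.2).get? nm).getD 0)) nm PySem.Dict.empty
          (acc.insert nm PySem.Dict.empty)
          (PySem.Dict.nodup_keys_insert _ _ _ hnd) (PySem.Dict.contains_insert_self _ _ _),
        PySem.Dict.getD_insert_self, PySem.Dict.insert_insert_self]
    rw [ih _ (PySem.Dict.nodup_keys_insert _ _ _ hnd)]
    rfl

-- modifying a present key of a dict of rows rewrites exactly that row
lemma modify_mk_map (names : List String) (row : String → PySem.Dict String Int)
    (key p : String) (v : Int) (hnd : names.Nodup) (hmem : key ∈ names) :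
    (PySem.Dict.mk (names.map (fun nm => (nm, row nm)))).modify key PySem.Dict.empty (fun d => d.insert p v)
      = PySem.Dict.mk (names.map (fun nm => (nm, if nm = key then (row key).insert p v else row nm))) := by
  have hkeys : (PySem.Dict.mk (names.map (fun nm => (nm, row nm)))).keys = names := by
    simp [PySem.Dict.keys, Function.comp_def]
  have hndk : (PySem.Dict.mk (names.map (fun nm => (nm, row nm)))).keys.Nodup := by
    rw [hkeys]; exact hnd
  have hcon : (PySem.Dict.mk (names.map (fun nm => (nm, row nm)))).contains key = true := by
    rw [PySem.Dict.contains_iff_mem_keys, hkeys]; exact hmem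
  have hgetD : (PySem.Dict.mk (names.map (fun nm => (nm, row nm)))).getD key PySem.Dict.empty = row key :=
    PySem.Dict.getD_of_mem_items _ (List.mem_map_of_mem (f := fun nm => (nm, row nm)) hmem) hndk PySem.Dict.empty
  have hm : (PySem.Dict.mk (names.map (fun nm => (nm, row nm)))).modify key PySem.Dict.empty (fun d => d.insert p v)
      = (PySem.Dict.mk (names.map (fun nm => (nm, row nm)))).insert key ((row key).insert p v) := by
    rw [← hgetD]; rfl
  rw [hm]
  apply PySem.Dict.ext
  rw [PySem.Dict.items_insert_of_contains _ _ hcon]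
  simp only [List.map_map]
  apply List.map_congr_left
  intro nm _
  by_cases h : nm = key
  · subst h; simp
  · simp [h]

-- B's inner loop over one plate's items acts row-wise on a dict of rows
lemma b_inner (names : List String) (hnd : names.Nodup) (p : String) (l : List (String × Int))
    (row : String → PySem.Dict String Int) :
    l.foldl (fun r wv =>
        if PySem.Set.contains (PySem.Set.ofList names) wv.1 then
          r.modify wv.1 PySem.Dict.empty (fun d => d.insert p wv.2)
        else r)
      (PySem.Dict.mk (names.map (fun nm => (nm, row nm))))
      = PySem.Dict.mk (names.map (fun nm =>
          (nm, l.foldl (fun d wv => if wv.1 == nm then d.insert p wv.2 else d) (row nm)))) := by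
  induction l generalizing row with
  | nil => rfl
  | cons wv l ih =>
    simp only [List.foldl_cons]
    by_cases hq : wv.1 ∈ names
    · have hcon : PySem.Set.contains (PySem.Set.ofList names) wv.1 = true := by
        rw [PySem.Set.contains_iff]; exact (PySem.Set.mem_ofList _ _).2 hq
      simp only [hcon, if_true]
      rw [modify_mk_map names row wv.1 p wv.2 hnd hq,
          ih (fun nm => if nm = wv.1 then (row wv.1).insert p wv.2 else row nm)]
      congr 1
      apply List.map_congr_left
      intro nm _
      by_cases h : nm = wv.1
      · subst h; simp
      · have hb : (wv.1 == nm) = false := beq_eq_false_iff_ne.2 (fun hh => h hh.symm)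
        simp [h, hb]
    · have hcon : PySem.Set.contains (PySem.Set.ofList names) wv.1 = false := by
        rw [← Bool.not_eq_true, PySem.Set.contains_iff]
        simp [PySem.Set.mem_ofList, hq]
      simp only [hcon, Bool.false_eq_true, if_false]
      rw [ih row]
      congr 1
      apply List.map_congr_left
      intro nm hmem
      have hb : (wv.1 == nm) = false := beq_eq_false_iff_ne.2 (fun hh => hq (hh ▸ hmem))
      simp [hb]

-- B's double loop acts row-wise
lemma b_outer (names : List String) (hnd : names.Nodup) (wdl : List (String × List (String × Int)))
    (row : String → PySem.Dict String Int) :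
    wdl.foldl (fun r pw =>
        pw.2.foldl (fun r wv =>
            if PySem.Set.contains (PySem.Set.ofList names) wv.1 then
              r.modify wv.1 PySem.Dict.empty (fun d => d.insert pw.1 wv.2)
            else r)
          r)
      (PySem.Dict.mk (names.map (fun nm => (nm, row nm))))
      = PySem.Dict.mk (names.map (fun nm =>
          (nm, wdl.foldl (fun d pw =>
                  pw.2.foldl (fun d wv => if wv.1 == nm then d.insert pw.1 wv.2 else d) d)
                (row nm)))) := by
  induction wdl generalizing row with
  | nil => rfl
  | cons pw wdl ih =>
    simp only [List.foldl_cons]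
    rw [b_inner names hnd pw.1 pw.2 row,
        ih (fun nm => pw.2.foldl (fun d wv => if wv.1 == nm then d.insert pw.1 wv.2 else d) (row nm))]

-- a per-plate filter fold with no matching key is the identity
lemma foldl_filter_insert_of_not_mem (nm p : String) (l : List (String × Int))
    (d : PySem.Dict String Int) (h : nm ∉ l.map Prod.fst) :
    l.foldl (fun d wv => if wv.1 == nm then d.insert p wv.2 else d) d = d := by
  induction l with
  | nil => rfl
  | cons wv l ih =>
    have h1 : wv.1 ≠ nm := fun hh => h (by simp [← hh])
    have h2 : nm ∉ l.map Prod.fst := fun hh => h (by simp [hh])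
    have hb : (wv.1 == nm) = false := by simp [h1]
    simp only [List.foldl_cons, hb, Bool.false_eq_true, if_false]
    exact ih h2

-- on a duplicate-free plate, B's item filter equals A's membership test + first-match lookup
lemma inner_filter_aux (nm p : String) (l : List (String × Int))
    (d : PySem.Dict String Int) (hnd : (l.map Prod.fst).Nodup) :
    l.foldl (fun d wv => if wv.1 == nm then d.insert p wv.2 else d) d
      = if (PySem.Dict.mk l).contains nm then d.insert p (((PySem.Dict.mk l).get? nm).getD 0) else d := by
  induction l generalizing d with
  | nil => simp [PySem.Dict.contains_eq_isSome_get?, PySem.Dict.get?]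
  | cons wv l ih =>
    obtain ⟨k, v⟩ := wv
    simp only [List.map_cons, List.nodup_cons] at hnd
    by_cases h : k = nm
    · subst h
      simp only [List.foldl_cons, beq_self_eq_true, if_true]
      rw [foldl_filter_insert_of_not_mem _ _ _ _ hnd.1]
      rw [PySem.Dict.contains_eq_isSome_get?, PySem.Dict.get?_mk_cons]
      simp
    · have hb : (k == nm) = false := by simp [h]
      simp only [List.foldl_cons, hb, Bool.false_eq_true, if_false]
      rw [ih d hnd.2]
      rw [PySem.Dict.contains_eq_isSome_get?, PySem.Dict.contains_eq_isSome_get?,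
          PySem.Dict.get?_mk_cons]
      simp [hb]

lemma pvWellNames_nodup : pvWellNames.Nodup := by decide

-- the two-digit branch in A is always taken: well numbers are mod·8 + 1 ∈ 1..8
lemma a_name_eq (i : Int) :
    (if PySem.Int.mod i 8 + 1 < 10 then '0' :: PySem.Int.toChars (PySem.Int.mod i 8 + 1)
     else PySem.Int.toChars (PySem.Int.mod i 8 + 1))
      = '0' :: PySem.Int.toChars (PySem.Int.mod i 8 + 1) := by
  have := PySem.Int.mod_lt i (b := 8) (by norm_num)
  rw [if_pos (by omega)]

-- A's outer loop over the range, with the names computed inline, is the loop over pvWellNames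
lemma a_range_to_names (wdl : List (String × List (String × Int))) :
    (PySem.List.pyRange 0 48 1).foldl
      (fun acc well =>
        (wdl.foldl (fun a pw =>
            if (PySem.Dict.mk pw.2).contains
                (String.ofList (Char.ofNat (65 + PySem.Int.floordiv well 8).toNat ::
                  (if PySem.Int.mod well 8 + 1 < 10 then '0' :: PySem.Int.toChars (PySem.Int.mod well 8 + 1)
                   else PySem.Int.toChars (PySem.Int.mod well 8 + 1)))) then
              a.modify (String.ofList (Char.ofNat (65 + PySem.Int.floordiv well 8).toNat ::
                  (if PySem.Int.mod well 8 + 1 < 10 then '0' :: PySem.Int.toChars (PySem.Int.mod well 8 + 1)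
                   else PySem.Int.toChars (PySem.Int.mod well 8 + 1)))) PySem.Dict.empty
                (fun d => d.insert pw.1 (((PySem.Dict.mk pw.2).get?
                  (String.ofList (Char.ofNat (65 + PySem.Int.floordiv well 8).toNat ::
                    (if PySem.Int.mod well 8 + 1 < 10 then '0' :: PySem.Int.toChars (PySem.Int.mod well 8 + 1)
                     else PySem.Int.toChars (PySem.Int.mod well 8 + 1))))).getD 0))
            else a)
          (acc.insert (String.ofList (Char.ofNat (65 + PySem.Int.floordiv well 8).toNat ::
              (if PySem.Int.mod well 8 + 1 < 10 then '0' :: PySem.Int.toChars (PySem.Int.mod well 8 + 1)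
               else PySem.Int.toChars (PySem.Int.mod well 8 + 1)))) PySem.Dict.empty)))
      (PySem.Dict.empty : PySem.Dict String (PySem.Dict String Int))
      = pvWellNames.foldl (fun acc nm =>
          wdl.foldl (fun a pw =>
              if (PySem.Dict.mk pw.2).contains nm then
                a.modify nm PySem.Dict.empty (fun d => d.insert pw.1 (((PySem.Dict.mk pw.2).get? nm).getD 0))
              else a)
            (acc.insert nm PySem.Dict.empty))
        PySem.Dict.empty := by
  rw [pvWellNames, List.foldl_map]
  apply PySem.List.foldl_congr_mem
  intro acc i _
  rw [a_name_eq i]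

-- B's initial dict, all 48 wells mapped to {}
lemma b_init_eq : List.foldl (fun r nm => r.insert nm PySem.Dict.empty) PySem.Dict.empty pvWellNames
    = PySem.Dict.mk (pvWellNames.map (fun nm => (nm, (PySem.Dict.empty : PySem.Dict String Int)))) := by
  apply PySem.Dict.ext
  have h := PySem.Dict.items_foldl_insert_fresh pvWellNames (fun nm => nm)
      (fun _ => (PySem.Dict.empty : PySem.Dict String Int)) PySem.Dict.empty
      (fun a _ => PySem.Dict.contains_empty a) (by simpa using pvWellNames_nodup)
  simpa using h

-- the items of A's dict: one row per well name, in name order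
lemma a_items (wdl : List (String × List (String × Int))) :
    (List.foldl (fun acc nm => acc.insert nm (pvRow wdl nm)) PySem.Dict.empty pvWellNames).items
      = pvWellNames.map (fun nm => (nm, pvRow wdl nm)) := by
  have h := PySem.Dict.items_foldl_insert_fresh pvWellNames (fun nm => nm)
      (fun nm => pvRow wdl nm) PySem.Dict.empty
      (fun a _ => PySem.Dict.contains_empty a) (by simpa using pvWellNames_nodup)
  simpa using h

-- per well name, B's filtered pass over the plates builds exactly A's row
lemma rows_eq (wdl : List (String × List (String × Int)))
    (hpre : Pre_get_complete_wells_data wdl) (nm : String) :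
    wdl.foldl (fun d pw =>
        pw.2.foldl (fun d wv => if wv.1 == nm then d.insert pw.1 wv.2 else d) d)
      PySem.Dict.empty = pvRow wdl nm := by
  unfold pvRow
  apply PySem.List.foldl_congr_mem
  intro d pw hmem
  have h := inner_filter_aux nm pw.1 pw.2 d (hpre.2 pw hmem)
  simpa [pvRowStep] using h

-- the two dict-building computations agree
lemma dict_eq (wdl : List (String × List (String × Int)))
    (hpre : Pre_get_complete_wells_data wdl) :
    (PySem.List.pyRange 0 48 1).foldl
      (fun acc well =>
        (wdl.foldl (fun a pw =>
            if (PySem.Dict.mk pw.2).contains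
                (String.ofList (Char.ofNat (65 + PySem.Int.floordiv well 8).toNat ::
                  (if PySem.Int.mod well 8 + 1 < 10 then '0' :: PySem.Int.toChars (PySem.Int.mod well 8 + 1)
                   else PySem.Int.toChars (PySem.Int.mod well 8 + 1)))) then
              a.modify (String.ofList (Char.ofNat (65 + PySem.Int.floordiv well 8).toNat ::
                  (if PySem.Int.mod well 8 + 1 < 10 then '0' :: PySem.Int.toChars (PySem.Int.mod well 8 + 1)
                   else PySem.Int.toChars (PySem.Int.mod well 8 + 1)))) PySem.Dict.empty
                (fun d => d.insert pw.1 (((PySem.Dict.mk pw.2).get?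
                  (String.ofList (Char.ofNat (65 + PySem.Int.floordiv well 8).toNat ::
                    (if PySem.Int.mod well 8 + 1 < 10 then '0' :: PySem.Int.toChars (PySem.Int.mod well 8 + 1)
                     else PySem.Int.toChars (PySem.Int.mod well 8 + 1))))).getD 0))
            else a)
          (acc.insert (String.ofList (Char.ofNat (65 + PySem.Int.floordiv well 8).toNat ::
              (if PySem.Int.mod well 8 + 1 < 10 then '0' :: PySem.Int.toChars (PySem.Int.mod well 8 + 1)
               else PySem.Int.toChars (PySem.Int.mod well 8 + 1)))) PySem.Dict.empty)))
      (PySem.Dict.empty : PySem.Dict String (PySem.Dict String Int))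
      = wdl.foldl
          (fun r pw =>
            pw.2.foldl
              (fun r wv =>
                if PySem.Set.contains (PySem.Set.ofList pvWellNames) wv.1 then
                  r.modify wv.1 PySem.Dict.empty (fun d => d.insert pw.1 wv.2)
                else r)
              r)
          (List.foldl (fun r nm => r.insert nm PySem.Dict.empty) PySem.Dict.empty pvWellNames) := by
  rw [a_range_to_names wdl,
      a_outer_eq wdl pvWellNames PySem.Dict.empty PySem.Dict.nodup_keys_empty,
      b_init_eq,
      b_outer pvWellNames pvWellNames_nodup wdl (fun _ => PySem.Dict.empty)]
  apply PySem.Dict.ext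
  rw [a_items wdl]
  dsimp only
  apply List.map_congr_left
  intro nm _
  exact congrArg (fun d => (nm, d)) (rows_eq wdl hpre nm).symm

-- ===== VERDICT (by name: the statement is the Claim_ definition above) =====
theorem get_complete_wells_data_spec : Claim_equal_get_complete_wells_data := by
  intro wdl _ hpre
  unfold Spec_get_complete_wells_data
  unfold get_complete_wells_data get_complete_wells_data_alt
  exact congrArg (fun d : PySem.Dict String (PySem.Dict String Int) =>
    d.items.map (fun p => (p.1, p.2.items))) (dict_eq wdl hpre)
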